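-- pv_equiv track=rewrite | github.com/aifintechlab/skku-con5110-fai | scripts/portfolio_visualizer.py | extract_week_number
-- ===== SOURCE A (Python) =====
-- def extract_week_number(name: str) -> int:
--     digits = ""
--     for ch in reversed(name):
--         if ch.isdigit():
--             digits = ch + digits
--         elif digits:
--             break
--     if digits:
--         return int(digits)
--     raise ValueError(f"Cannot parse week number from directory name: {name}")
-- ===== SOURCE B (Python) =====
-- def extract_week_number(name: str) -> int:
--     current = ""
--     last = ""
--     for ch in name:
--         if ch.isdigit():
--             current += ch
--         else:
--             if current:
--                 last = current
--                 current = ""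
--     run = current if current else last
--     if run:
--         return int(run)
--     raise ValueError(f"Cannot parse week number from directory name: {name}")
-- ===== Notes on version B (the rewrite author's own statement) =====
-- stated objective: alternative
-- what changed: Forward single pass keeping the current digit run and the last completed run, instead of A's reverse scan with break; same trailing-digit-group result.
import Mathlib
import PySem

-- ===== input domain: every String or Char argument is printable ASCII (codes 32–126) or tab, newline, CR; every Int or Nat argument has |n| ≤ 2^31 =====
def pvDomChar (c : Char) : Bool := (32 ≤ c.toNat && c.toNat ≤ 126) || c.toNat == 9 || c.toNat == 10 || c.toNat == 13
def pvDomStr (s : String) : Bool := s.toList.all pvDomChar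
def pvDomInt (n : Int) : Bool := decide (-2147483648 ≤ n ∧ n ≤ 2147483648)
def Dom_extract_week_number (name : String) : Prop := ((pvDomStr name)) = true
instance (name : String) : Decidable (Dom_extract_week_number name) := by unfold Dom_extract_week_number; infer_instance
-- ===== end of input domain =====

-- B replaces A's reverse scan-with-break by a forward pass keeping the current digit run
-- and the last completed run (objective: alternative decomposition, same cost).

-- ===== PORT A =====
-- loop 'for ch in reversed(name)' with break, accumulator 'digits' (prepend)
def pvGoA : List Char → List Char → List Char
  | [], digits => digits
  | c :: rest, digits =>
    if PySem.Chars.isdigit c then pvGoA rest (c :: digits)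
    else if digits ≠ [] then digits
    else pvGoA rest digits

def extract_week_number (name : String) : Int :=
  let digits := pvGoA name.toList.reverse []
  if digits ≠ [] then (PySem.Int.ofChars? digits).getD 0   -- int(digits); never none on a nonempty digit run
  else 0   -- Python raises ValueError here; excluded by Pre_

-- ===== PORT B =====
-- forward loop body of Source B: state (current, last)
def pvStepB (p : List Char × List Char) (c : Char) : List Char × List Char :=
  if PySem.Chars.isdigit c then (p.1 ++ [c], p.2)
  else if p.1 ≠ [] then ([], p.1)
  else p

def extract_week_number_alt (name : String) : Int :=
  let p := name.toList.foldl pvStepB ([], [])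
  let run := if p.1 ≠ [] then p.1 else p.2
  if run ≠ [] then (PySem.Int.ofChars? run).getD 0
  else 0   -- Python raises ValueError here; excluded by Pre_

-- ===== PRECONDITION & SPEC =====
-- Pre_ excludes exactly the names with no digit character, where the Python A raises ValueError.
def Pre_extract_week_number (name : String) : Prop := name.toList.any PySem.Chars.isdigit = true
instance (name : String) : Decidable (Pre_extract_week_number name) := by unfold Pre_extract_week_number; infer_instance
def pvWitness_extract_week_number : String := "week_07"
def Spec_extract_week_number (name : String) (out : Int) : Prop := out = extract_week_number_alt name
instance (name : String) (out : Int) : Decidable (Spec_extract_week_number name out) := by unfold Spec_extract_week_number; infer_instance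

-- ===== CLAIM (what is proved, stated in full; the proofs are below) =====
def Claim_equal_extract_week_number : Prop := ∀ (name : String), Dom_extract_week_number name → Pre_extract_week_number name → Spec_extract_week_number name (extract_week_number name)

-- ===== LEMMAS AND PROOFS =====

-- A's scan with a nonempty accumulator takes the leading digit run and stops.
theorem pvGoA_ne_nil (r acc : List Char) (h : acc ≠ []) :
    pvGoA r acc = (r.takeWhile PySem.Chars.isdigit).reverse ++ acc := by
  induction r generalizing acc with
  | nil => simp [pvGoA]
  | cons c rest ih =>
    by_cases hd : PySem.Chars.isdigit c
    · rw [pvGoA, if_pos hd, ih (c :: acc) (by simp)]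
      simp [List.takeWhile_cons, hd]
    · simp [pvGoA, hd, h]

-- A's full scan: reverse of the first digit run of r (after skipping leading non-digits).
theorem pvGoA_nil (r : List Char) :
    pvGoA r [] = ((r.dropWhile (fun c => !PySem.Chars.isdigit c)).takeWhile PySem.Chars.isdigit).reverse := by
  induction r with
  | nil => simp [pvGoA]
  | cons c rest ih =>
    by_cases hd : PySem.Chars.isdigit c
    · simp [pvGoA, hd, List.takeWhile_cons, pvGoA_ne_nil rest [c] (by simp)]
    · simp [pvGoA, hd, ih]

-- B's fold over r.reverse, characterised on r (= the reversed input).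
theorem pvFoldB (r : List Char) :
    r.reverse.foldl pvStepB ([], []) =
      ((r.takeWhile PySem.Chars.isdigit).reverse,
       (((r.dropWhile PySem.Chars.isdigit).dropWhile (fun c => !PySem.Chars.isdigit c)).takeWhile PySem.Chars.isdigit).reverse) := by
  induction r with
  | nil => simp
  | cons c rest ih =>
    have hstep : (c :: rest).reverse.foldl pvStepB ([], [])
        = pvStepB (rest.reverse.foldl pvStepB ([], [])) c := by
      simp [List.foldl_append]
    rw [hstep, ih]
    by_cases hd : PySem.Chars.isdigit c
    · simp [pvStepB, hd]
    · by_cases hcur : rest.takeWhile PySem.Chars.isdigit = []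
      · have hdrop : rest.dropWhile PySem.Chars.isdigit = rest := by
          cases h : rest with
          | nil => simp
          | cons x xs =>
            rw [List.dropWhile_cons]
            have : ¬ PySem.Chars.isdigit x = true := by
              intro hx
              rw [h, List.takeWhile_cons, if_pos hx] at hcur
              simp at hcur
            simp [this]
        simp [pvStepB, hd, hcur, hdrop]
      · have hdrop : (c :: rest).dropWhile PySem.Chars.isdigit = c :: rest := by
          simp [hd]
        have : rest.dropWhile (fun c => !PySem.Chars.isdigit c) = rest := by
          cases h : rest with
          | nil => simp
          | cons x xs =>
            rw [List.dropWhile_cons]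
            have hx : PySem.Chars.isdigit x = true := by
              by_contra hx
              rw [h, List.takeWhile_cons, if_neg hx] at hcur
              exact hcur rfl
            simp [hx]
        simp [pvStepB, hd, hcur, hdrop, this]

-- both ports' digit strings coincide (even with no digit present: both empty)
theorem run_eq (l : List Char) :
    (let p := l.foldl pvStepB ([], []); if p.1 ≠ [] then p.1 else p.2) = pvGoA l.reverse [] := by
  have := pvFoldB l.reverse
  rw [List.reverse_reverse] at this
  rw [this, pvGoA_nil]
  by_cases hcur : l.reverse.takeWhile PySem.Chars.isdigit = []
  · have hdrop : l.reverse.dropWhile PySem.Chars.isdigit = l.reverse := by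
      cases h : l.reverse with
      | nil => simp
      | cons x xs =>
        rw [List.dropWhile_cons]
        have : ¬ PySem.Chars.isdigit x = true := by
          intro hx
          rw [h, List.takeWhile_cons, if_pos hx] at hcur
          simp at hcur
        simp [this]
    simp [hcur, hdrop]
  · have hdrop : l.reverse.dropWhile (fun c => !PySem.Chars.isdigit c) = l.reverse := by
      cases h : l.reverse with
      | nil => simp
      | cons x xs =>
        rw [List.dropWhile_cons]
        have hx : PySem.Chars.isdigit x = true := by
          by_contra hx
          rw [h, List.takeWhile_cons, if_neg hx] at hcur
          exact hcur rfl
        simp [hx]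
    simp [hcur, hdrop]

-- ===== VERDICT (by name: the statement is the Claim_ definition above) =====
theorem extract_week_number_spec : Claim_equal_extract_week_number := by
  intro name _ _
  unfold Spec_extract_week_number extract_week_number extract_week_number_alt
  have h := run_eq name.toList
  dsimp only at h ⊢
  rw [h]
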